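-- pv_equiv track=rewrite | github.com/HerreraColladoLuis/Aoc_2022 | day-three.py | solve_group
-- ===== SOURCE A (Python) =====
-- def get_game_lib_p1():
--     my_lib = {'a':1,'b':2,'c':3,'d':4,'e':5,'f':6,'g':7,'h':8,'i':9
--               ,'j':10,'k':11,'l':12,'m':13,'n':14,'o':15,'p':16,'q':17
--                  ,'r':18,'s':19,'t':20,'u':21,'v':22,'w':23,'x':24,'y':25,'z':26,
--               'A':27,'B':28,'C':29,'D':30,'E':31,'F':32,'G':33,'H':34,'I':35,'J':36
--         ,'K':37,'L':38,'M':39,'N':40,'O':41,'P':42,'Q':43,'R':44,'S':45,'T':46,'U':47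
--         ,'V':48,'W':49,'X':50,'Y':51,'Z':52}
--     return my_lib
--
-- def solve_group(group_list):
--     my_lib = get_game_lib_p1()
--     value = 0
--     aux_list = compare(group_list[0],group_list[1])
--     elements = compare(aux_list,group_list[2])
--     for ele in elements:
--         value = value + my_lib[ele]
--
--     return value
--
-- def compare(list_1, list_2):
--     elements = []
--     for elem_1 in list_1:
--         for elem_2 in list_2:
--             if elem_1 == elem_2:
--                 if elem_1 not in elements:
--                     elements.append(elem_1)
--
--     return elements
-- ===== SOURCE B (Python) =====
-- def _priority(c):
--     o = ord(c)
--     return o - 96 if o >= 97 else o - 38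
--
-- def solve_group(group_list):
--     g0, g1, g2 = group_list[0], group_list[1], group_list[2]
--     return sum(_priority(c) for c in set(g0) & set(g1) & set(g2))
-- ===== Notes on version B (the rewrite author's own statement) =====
-- stated objective: simpler
-- what changed: Replaces the two pairwise nested-loop compare passes and the 52-entry lookup table by a set intersection of the three rucksacks plus a closed-form arithmetic priority (ord-based), summed in one expression.
import Mathlib
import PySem

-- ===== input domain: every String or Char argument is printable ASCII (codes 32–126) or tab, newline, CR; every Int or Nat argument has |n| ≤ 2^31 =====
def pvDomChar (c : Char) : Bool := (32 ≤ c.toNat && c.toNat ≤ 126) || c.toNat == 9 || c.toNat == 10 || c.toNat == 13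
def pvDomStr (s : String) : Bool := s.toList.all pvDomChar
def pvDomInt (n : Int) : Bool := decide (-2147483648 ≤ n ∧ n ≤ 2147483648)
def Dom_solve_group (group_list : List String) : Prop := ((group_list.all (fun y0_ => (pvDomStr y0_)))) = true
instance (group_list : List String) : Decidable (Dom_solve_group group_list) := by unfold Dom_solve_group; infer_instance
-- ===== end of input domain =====

-- B replaces A's two pairwise nested-loop compare passes and the 52-entry lookup table
-- by a set intersection of the three rucksacks plus a closed-form arithmetic priority
-- (objective: simpler).

-- ===== PORT A =====
-- dict literal of get_game_lib_p1
def get_game_lib_p1 : PySem.Dict Char Int := PySem.Dict.ofList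
  [('a',1),('b',2),('c',3),('d',4),('e',5),('f',6),('g',7),('h',8),('i',9),
   ('j',10),('k',11),('l',12),('m',13),('n',14),('o',15),('p',16),('q',17),
   ('r',18),('s',19),('t',20),('u',21),('v',22),('w',23),('x',24),('y',25),('z',26),
   ('A',27),('B',28),('C',29),('D',30),('E',31),('F',32),('G',33),('H',34),('I',35),('J',36),
   ('K',37),('L',38),('M',39),('N',40),('O',41),('P',42),('Q',43),('R',44),('S',45),('T',46),('U',47),
   ('V',48),('W',49),('X',50),('Y',51),('Z',52)]

-- helper 'compare' of A, literally: nested loops with a dedup membership test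
def pyCompare (list_1 list_2 : List Char) : List Char :=
  list_1.foldl (fun elements elem_1 =>
    list_2.foldl (fun elements elem_2 =>
      if elem_1 == elem_2 then
        (if elements.contains elem_1 then elements else elements ++ [elem_1])
      else elements) elements) []

-- group_list[i] → pyGetD (Pre_ gives 3 ≤ length); my_lib[ele] → getD 0 (Pre_ excludes KeyError)
def solve_group (group_list : List String) : Int :=
  let my_lib := get_game_lib_p1
  let aux_list := pyCompare (PySem.List.pyGetD group_list 0 "").toList
                            (PySem.List.pyGetD group_list 1 "").toList
  let elements := pyCompare aux_list (PySem.List.pyGetD group_list 2 "").toList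
  elements.foldl (fun value ele => value + my_lib.getD ele 0) 0

-- ===== PORT B =====
-- _priority of Source B: the arithmetic priority formula
def priorityOf (c : Char) : Int :=
  let o : Int := c.toNat
  if 97 ≤ o then o - 96 else o - 38

-- set(g0) & set(g1) & set(g2); summing over a set is order-independent, so the
-- hash-order iteration of Python's sum() is exact here
def solve_group_alt (group_list : List String) : Int :=
  let g0 := PySem.List.pyGetD group_list 0 ""
  let g1 := PySem.List.pyGetD group_list 1 ""
  let g2 := PySem.List.pyGetD group_list 2 ""
  let common := PySem.Set.inter
    (PySem.Set.inter (PySem.Set.ofList g0.toList) (PySem.Set.ofList g1.toList))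
    (PySem.Set.ofList g2.toList)
  (common.map priorityOf).sum

-- ===== PRECONDITION & SPEC =====
-- Pre_ excludes exactly where Python A raises: lists shorter than 3 (IndexError at
-- group_list[2]) and groups whose common-to-all-three character is not an ASCII
-- letter (KeyError in my_lib).
def Pre_solve_group (group_list : List String) : Prop :=
  3 ≤ group_list.length ∧
  ((PySem.List.pyGetD group_list 0 "").toList.all (fun c =>
    !((PySem.List.pyGetD group_list 1 "").toList.contains c &&
      (PySem.List.pyGetD group_list 2 "").toList.contains c)
      || PySem.Chars.isalpha c)) = true
instance (group_list : List String) : Decidable (Pre_solve_group group_list) := by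
  unfold Pre_solve_group; infer_instance

def pvWitness_solve_group : List String := ["vJrwa", "jqHva", "PmmdA"]

def Spec_solve_group (group_list : List String) (out : Int) : Prop := out = solve_group_alt group_list
instance (group_list : List String) (out : Int) : Decidable (Spec_solve_group group_list out) := by unfold Spec_solve_group; infer_instance

-- ===== CLAIM (what is proved, stated in full; the proofs are below) =====
def Claim_equal_solve_group : Prop := ∀ (group_list : List String), Dom_solve_group group_list → Pre_solve_group group_list → Spec_solve_group group_list (solve_group group_list)

-- ===== LEMMAS AND PROOFS =====

-- the body of A's inner loop, with Bool tests rewritten to Prop tests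
theorem pvStep_eq (e1 : Char) :
    (fun (els : List Char) (e2 : Char) =>
        if e1 == e2 then (if els.contains e1 then els else els ++ [e1]) else els)
      = fun els e2 => if e1 = e2 then (if e1 ∈ els then els else els ++ [e1]) else els := by
  funext els e2
  simp only [List.contains_iff_mem, beq_iff_eq]

-- A's inner loop over list_2: adds elem_1 once iff it occurs in list_2 and is new
theorem pvInner_eq (e1 : Char) (l2 acc : List Char) :
    l2.foldl (fun els e2 => if e1 = e2 then (if e1 ∈ els then els else els ++ [e1]) else els) acc
      = if e1 ∈ l2 then (if e1 ∈ acc then acc else acc ++ [e1]) else acc := by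
  induction l2 generalizing acc with
  | nil => simp
  | cons h t ih =>
    rw [List.foldl_cons]
    by_cases he : e1 = h
    · subst he
      rw [if_pos rfl, ih]
      by_cases hm : e1 ∈ acc
      · simp [hm]
      · have hm' : e1 ∈ acc ++ [e1] := by simp
        simp [hm, hm']
    · rw [if_neg he, ih]
      simp [List.mem_cons, he]

-- membership in A's outer loop
theorem pvOuter_mem (l1 l2 acc : List Char) (x : Char) :
    x ∈ l1.foldl (fun elements elem_1 =>
        l2.foldl (fun els e2 => if elem_1 = e2 then (if elem_1 ∈ els then els else els ++ [elem_1]) else els) elements) acc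
      ↔ x ∈ acc ∨ (x ∈ l1 ∧ x ∈ l2) := by
  induction l1 generalizing acc with
  | nil => simp
  | cons a t ih =>
    rw [List.foldl_cons, ih, pvInner_eq]
    by_cases ha2 : a ∈ l2
    · by_cases hm : a ∈ acc
      · rw [if_pos ha2, if_pos hm]
        simp only [List.mem_cons]
        constructor
        · rintro (h | ⟨h, h2⟩)
          · exact Or.inl h
          · exact Or.inr ⟨Or.inr h, h2⟩
        · rintro (h | ⟨(rfl | h), h2⟩)
          · exact Or.inl h
          · exact Or.inl hm
          · exact Or.inr ⟨h, h2⟩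
      · rw [if_pos ha2, if_neg hm]
        simp only [List.mem_cons, List.mem_append, List.not_mem_nil, or_false]
        constructor
        · rintro ((h | rfl) | ⟨h, h2⟩)
          · exact Or.inl h
          · exact Or.inr ⟨Or.inl rfl, ha2⟩
          · exact Or.inr ⟨Or.inr h, h2⟩
        · rintro (h | ⟨(rfl | h), h2⟩)
          · exact Or.inl (Or.inl h)
          · exact Or.inl (Or.inr rfl)
          · exact Or.inr ⟨h, h2⟩
    · rw [if_neg ha2]
      simp only [List.mem_cons]
      constructor
      · rintro (h | ⟨h, h2⟩)
        · exact Or.inl h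
        · exact Or.inr ⟨Or.inr h, h2⟩
      · rintro (h | ⟨(rfl | h), h2⟩)
        · exact Or.inl h
        · exact absurd h2 ha2
        · exact Or.inr ⟨h, h2⟩

-- A's outer loop preserves Nodup of the accumulator
theorem pvOuter_nodup (l1 l2 acc : List Char) (h : acc.Nodup) :
    (l1.foldl (fun elements elem_1 =>
        l2.foldl (fun els e2 => if elem_1 = e2 then (if elem_1 ∈ els then els else els ++ [elem_1]) else els) elements) acc).Nodup := by
  induction l1 generalizing acc with
  | nil => simpa
  | cons a t ih =>
    rw [List.foldl_cons]
    apply ih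
    rw [pvInner_eq]
    split_ifs with h1 h2
    · exact h
    · simp [List.nodup_append, h]
      exact fun b hb e => h2 (e ▸ hb)
    · exact h

theorem pvCompare_eq (l1 l2 : List Char) :
    pyCompare l1 l2 = l1.foldl (fun elements elem_1 =>
      l2.foldl (fun els e2 => if elem_1 = e2 then (if elem_1 ∈ els then els else els ++ [elem_1]) else els) elements) [] := by
  unfold pyCompare
  congr 1
  funext elements elem_1
  rw [pvStep_eq]

theorem pvCompare_mem (l1 l2 : List Char) (x : Char) :
    x ∈ pyCompare l1 l2 ↔ x ∈ l1 ∧ x ∈ l2 := by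
  rw [pvCompare_eq, pvOuter_mem]; simp

theorem pvCompare_nodup (l1 l2 : List Char) : (pyCompare l1 l2).Nodup := by
  rw [pvCompare_eq]; exact pvOuter_nodup l1 l2 [] List.nodup_nil

-- the table lookup agrees with the arithmetic priority on ASCII letters
set_option maxRecDepth 4096 in
theorem pvPrio_eq (c : Char) (h : PySem.Chars.isalpha c = true) :
    get_game_lib_p1.getD c 0 = priorityOf c := by
  have hn : (65 ≤ c.toNat ∧ c.toNat ≤ 90) ∨ (97 ≤ c.toNat ∧ c.toNat ≤ 122) := by
    simp only [PySem.Chars.isalpha, PySem.Chars.isupper, PySem.Chars.islower,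
      Bool.or_eq_true, Bool.and_eq_true, decide_eq_true_eq, Char.le_def] at h
    rcases h with ⟨h1, h2⟩ | ⟨h1, h2⟩ <;>
      [left; right] <;>
      exact ⟨UInt32.le_iff_toNat_le.mp h1, UInt32.le_iff_toNat_le.mp h2⟩
  have hc : c = Char.ofNat c.toNat := (Char.ofNat_toNat c).symm
  rcases hn with ⟨h1, h2⟩ | ⟨h1, h2⟩ <;>
  · set n := c.toNat with hdef
    clear_value n
    rw [hc]
    interval_cases n <;> decide

-- ===== VERDICT (by name: the statement is the Claim_ definition above) =====
theorem solve_group_spec : Claim_equal_solve_group := by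
  intro gl _ hpre
  unfold Spec_solve_group solve_group solve_group_alt
  dsimp only
  set t0 := (PySem.List.pyGetD gl 0 "").toList with ht0
  set t1 := (PySem.List.pyGetD gl 1 "").toList with ht1
  set t2 := (PySem.List.pyGetD gl 2 "").toList with ht2
  set common := PySem.Set.inter (PySem.Set.inter (PySem.Set.ofList t0) (PySem.Set.ofList t1))
    (PySem.Set.ofList t2) with hcommon
  -- A's loop as a sum over the common-elements list
  rw [PySem.List.foldl_add]
  simp only [zero_add]
  set listA := pyCompare (pyCompare t0 t1) t2 with hlistA
  -- every element of listA is an ASCII letter (Pre_)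
  have halpha : ∀ c ∈ listA, PySem.Chars.isalpha c = true := by
    intro c hcmem
    rw [hlistA, pvCompare_mem, pvCompare_mem] at hcmem
    obtain ⟨⟨hm0, hm1⟩, hm2⟩ := hcmem
    have hall := hpre.2
    rw [List.all_eq_true] at hall
    have := hall c hm0
    simpa [List.contains_iff_mem, ← ht1, ← ht2, hm1, hm2] using this
  -- replace the table lookup by the arithmetic priority
  have hmap : listA.map (fun ele => get_game_lib_p1.getD ele 0) = listA.map priorityOf :=
    List.map_congr_left (fun c hc => pvPrio_eq c (halpha c hc))
  rw [hmap]
  -- listA and common are nodup lists with the same members, hence permutations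
  have hperm : List.Perm listA common := by
    refine (List.perm_ext_iff_of_nodup (by rw [hlistA]; exact pvCompare_nodup _ _) ?_).mpr ?_
    · rw [hcommon]
      exact PySem.Set.nodup_inter _ _ (PySem.Set.nodup_inter _ _ (PySem.Set.nodup_ofList t0))
    · intro x
      rw [hlistA, pvCompare_mem, pvCompare_mem, hcommon,
        PySem.Set.mem_inter, PySem.Set.mem_inter, PySem.Set.mem_ofList,
        PySem.Set.mem_ofList, PySem.Set.mem_ofList]
  exact (hperm.map priorityOf).sum_eq
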